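-- pv_equiv track=rewrite | github.com/LauTB/Classroom-generator | groups_generator.py | sort_and_divide
-- ===== SOURCE A (Python) =====
-- def sort_and_divide(list):
--     temp_list = [i for i in list]
--     temp_list.sort()
--     list_of_lists = []
--
--     # category name from the first elem in the list
--     elem = temp_list[0][0]
--     # temp list for the future list of lists
--     temp = [temp_list[0]]
--
--     for item in temp_list[1:]:
--         if item[0] == elem:
--             temp.append(item)
--         else:
--             list_of_lists.append([i for i in temp])
--             temp = [item]
--             elem = item[0]
--     else:
--         list_of_lists.append([i for i in temp])
--     return list_of_lists
-- ===== SOURCE B (Python) =====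
-- def sort_and_divide(list):
--     keys = sorted({item[0] for item in list})
--     return [sorted(item for item in list if item[0] == key) for key in keys]
-- ===== Notes on version B (the rewrite author's own statement) =====
-- stated objective: simpler
-- what changed: Instead of sorting the whole list and run-scanning it with elem/temp boundary state, B never sorts the full list: it collects the distinct first characters, sorts those keys, and builds each group by filtering and sorting only that key's bucket.
import Mathlib
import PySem

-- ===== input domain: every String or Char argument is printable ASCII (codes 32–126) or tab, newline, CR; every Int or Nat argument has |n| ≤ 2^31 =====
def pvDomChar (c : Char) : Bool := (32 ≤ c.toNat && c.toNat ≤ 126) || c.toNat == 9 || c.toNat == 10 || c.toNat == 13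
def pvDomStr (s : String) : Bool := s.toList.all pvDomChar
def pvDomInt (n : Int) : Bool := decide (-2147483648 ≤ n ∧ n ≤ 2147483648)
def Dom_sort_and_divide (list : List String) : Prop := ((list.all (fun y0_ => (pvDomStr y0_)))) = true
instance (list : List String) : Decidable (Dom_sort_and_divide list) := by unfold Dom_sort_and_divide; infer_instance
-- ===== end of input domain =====

-- B replaces A's sort-everything-then-run-scan (elem/temp boundary state) by a key-first plan:
-- collect the distinct first characters, sort those keys, and build each group by filtering
-- and sorting only that key's bucket (simpler; same return value).

-- ===== PORT A =====
-- A's for-loop: state (elem, temp, list_of_lists); the for-else appends the last temp at the end.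
def sortAndDivideLoop : List String → Option Char → List String → List (List String) → List (List String)
  | [], _, temp, acc => acc ++ [temp.map (fun i => i)]
  | item :: rest, elem, temp, acc =>
    if PySem.Str.pyGet? item 0 == elem then
      sortAndDivideLoop rest elem (temp ++ [item]) acc
    else
      sortAndDivideLoop rest (PySem.Str.pyGet? item 0) [item] (acc ++ [temp.map (fun i => i)])

def sort_and_divide (list : List String) : List (List String) :=
  let temp_list := PySem.List.sorted (list.map (fun i => i)) (fun s => s) false
  match temp_list with
  | [] => []  -- temp_list[0] raises IndexError here; excluded by Pre_
  | t0 :: rest => sortAndDivideLoop rest (PySem.Str.pyGet? t0 0) [t0] []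

-- ===== PORT B =====
-- item[0] is PySem.Str.pyGet? item 0; inside Pre_ every string is nonempty, so pyGet? is
-- always `some` and filterMap collects exactly the first characters (on "" Python's item[0]
-- raises IndexError; such inputs are excluded by Pre_, where this port claims nothing).
def sort_and_divide_alt (list : List String) : List (List String) :=
  let keys := PySem.List.sorted
    (PySem.Set.ofList (list.filterMap (fun item => PySem.Str.pyGet? item 0)))
    (fun c => c) false
  keys.map (fun key =>
    PySem.List.sorted (list.filter (fun item => PySem.Str.pyGet? item 0 == some key))
      (fun s => s) false)

-- ===== PRECONDITION & SPEC =====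
-- Pre_ excludes exactly the inputs where A raises IndexError: the empty list (temp_list[0])
-- and lists containing an empty string ("" sorts first, and ""[0] / item[0] raises).
def Pre_sort_and_divide (list : List String) : Prop := list ≠ [] ∧ ∀ s ∈ list, s ≠ ""
instance (list : List String) : Decidable (Pre_sort_and_divide list) := by unfold Pre_sort_and_divide; infer_instance
def pvWitness_sort_and_divide : List String := ["ba", "ab", "b", "ac"]

def Spec_sort_and_divide (list : List String) (out : List (List String)) : Prop := out = sort_and_divide_alt list
instance (list : List String) (out : List (List String)) : Decidable (Spec_sort_and_divide list out) := by unfold Spec_sort_and_divide; infer_instance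

-- ===== CLAIM (what is proved, stated in full; the proofs are below) =====
def Claim_equal_sort_and_divide : Prop := ∀ (list : List String), Dom_sort_and_divide list → Pre_sort_and_divide list → Spec_sort_and_divide list (sort_and_divide list)

-- ===== LEMMAS AND PROOFS =====

-- first character of a nonempty string (proof-side key function)
def hkey (s : String) : Char := s.toList.headD 'a'

-- the groups of a key-sorted list, as runs of equal first characters (proof-side)
def grp : List String → List (List String)
  | [] => []
  | x :: xs =>
    (x :: xs.takeWhile (fun y => hkey y == hkey x)) :: grp (xs.dropWhile (fun y => hkey y == hkey x))
termination_by l => l.length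
decreasing_by
  exact Nat.lt_succ_of_le (List.length_dropWhile_le _ _)

-- the distinct first characters of a key-sorted list, in order (proof-side)
def dk : List String → List Char
  | [] => []
  | x :: xs => hkey x :: dk (xs.dropWhile (fun y => hkey y == hkey x))
termination_by l => l.length
decreasing_by
  exact Nat.lt_succ_of_le (List.length_dropWhile_le _ _)

lemma toList_ne_nil (s : String) (h : s ≠ "") : s.toList ≠ [] := by
  intro hc
  exact h (by have := congrArg String.ofList hc; simpa using this)

lemma pyGet?_zero_of_ne_empty (s : String) (h : s ≠ "") :
    PySem.Str.pyGet? s 0 = some (hkey s) := by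
  cases hs : s.toList with
  | nil => exact absurd hs (toList_ne_nil s h)
  | cons c cs =>
    simp [PySem.Str.pyGet?, hkey, hs]

lemma hkey_mono (s t : String) (hs : s ≠ "") (h : s ≤ t) : hkey s ≤ hkey t := by
  have ht' : s.toList ≠ [] := toList_ne_nil s hs
  rcases lt_or_eq_of_le h with hlt | rfl
  · have hl : s.toList < t.toList := String.lt_iff_toList_lt.mp hlt
    cases hseq : s.toList with
    | nil => exact absurd hseq ht'
    | cons a as =>
      cases hteq : t.toList with
      | nil => rw [hseq, hteq] at hl; exact absurd hl (by simp)
      | cons b bs =>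
        rw [hseq, hteq] at hl
        rcases List.cons_lt_cons_iff.mp hl with h1 | ⟨h1, _⟩
        · simp [hkey, hseq, hteq, le_of_lt h1]
        · simp [hkey, hseq, hteq, h1]
  · exact le_refl _

-- A's loop only ever appends to its accumulator
lemma loop_acc (rest : List String) : ∀ (elem : Option Char) (temp : List String)
    (acc : List (List String)),
    sortAndDivideLoop rest elem temp acc = acc ++ sortAndDivideLoop rest elem temp [] := by
  induction rest with
  | nil => intro elem temp acc; simp [sortAndDivideLoop]
  | cons x rest ih =>
    intro elem temp acc
    simp only [sortAndDivideLoop]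
    by_cases h : (PySem.Str.pyGet? x 0 == elem) = true
    · rw [if_pos h, if_pos h]; exact ih _ _ _
    · rw [if_neg h, if_neg h, ih _ _ (acc ++ _), ih _ _ ([] ++ _)]
      simp

-- in a key-sorted list with all keys ≥ k, everything surviving dropWhile (key == k) has key > k
lemma keys_dropWhile_gt (xs : List String) (k : Char)
    (hpw : (xs.map hkey).Pairwise (· ≤ ·)) (hge : ∀ y ∈ xs, k ≤ hkey y) :
    ∀ y ∈ xs.dropWhile (fun y => hkey y == k), k < hkey y := by
  induction xs with
  | nil => simp
  | cons z zs ih =>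
    have hc := List.pairwise_cons.mp (by simpa using hpw :
      (hkey z :: zs.map hkey).Pairwise (· ≤ ·))
    by_cases hz : hkey z = k
    · rw [List.dropWhile_cons_of_pos (by simp [hz])]
      exact ih hc.2 (fun y hy => hge y (by simp [hy]))
    · rw [List.dropWhile_cons_of_neg (by simp [hz])]
      intro y hy
      have hzk : k < hkey z := lt_of_le_of_ne (hge z (by simp)) (Ne.symm hz)
      rcases List.mem_cons.mp hy with rfl | hy
      · exact hzk
      · exact lt_of_lt_of_le hzk (hc.1 (hkey y) (List.mem_map_of_mem hy))

lemma mem_dk (xs : List String) : ∀ c, c ∈ dk xs ↔ c ∈ xs.map hkey := by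
  induction xs using dk.induct with
  | case1 => simp [dk]
  | case2 x xs ih =>
    intro c
    rw [dk]
    constructor
    · intro hc
      rcases List.mem_cons.mp hc with rfl | hc
      · simp
      · rcases (ih c).mp (by simpa using hc) with hc'
        rcases List.mem_map.mp hc' with ⟨y, hy, rfl⟩
        exact List.mem_map_of_mem (List.mem_cons_of_mem x ((xs.dropWhile_sublist _).mem hy))
    · intro hc
      rcases List.mem_map.mp hc with ⟨y, hy, rfl⟩
      rcases List.mem_cons.mp hy with rfl | hy
      · simp
      · rw [← List.takeWhile_append_dropWhile (p := fun y => hkey y == hkey x) (l := xs)]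
          at hy
        rcases List.mem_append.mp hy with hy | hy
        · have := List.mem_takeWhile_imp (p := fun y => hkey y == hkey x) hy
          simp only [beq_iff_eq] at this
          simp [this]
        · exact List.mem_cons_of_mem _ ((ih _).mpr (List.mem_map_of_mem hy))

lemma dk_pairwise (xs : List String)
    (hpw : (xs.map hkey).Pairwise (· ≤ ·)) : (dk xs).Pairwise (· < ·) := by
  induction xs using dk.induct with
  | case1 => simp [dk]
  | case2 x xs ih =>
    have hc := List.pairwise_cons.mp (by simpa using hpw :
      (hkey x :: xs.map hkey).Pairwise (· ≤ ·))
    have hge : ∀ y ∈ xs, hkey x ≤ hkey y := fun y hy =>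
      hc.1 (hkey y) (List.mem_map_of_mem hy)
    have hsub : ((xs.dropWhile (fun y => hkey y == hkey x)).map hkey).Sublist (xs.map hkey) :=
      (xs.dropWhile_sublist _).map hkey
    rw [dk]
    refine List.pairwise_cons.mpr ⟨?_, ih (hc.2.sublist hsub)⟩
    intro c hcmem
    rcases List.mem_map.mp ((mem_dk _ c).mp hcmem) with ⟨y, hy, rfl⟩
    exact keys_dropWhile_gt xs (hkey x) hc.2 hge y hy

-- the runs of a key-sorted list are its per-key filters, keys taken in order
lemma grp_eq_map (xs : List String)
    (hpw : (xs.map hkey).Pairwise (· ≤ ·)) :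
    grp xs = (dk xs).map (fun k => xs.filter (fun s => hkey s == k)) := by
  induction xs using grp.induct with
  | case1 => simp [grp, dk]
  | case2 x xs ih =>
    have hc := List.pairwise_cons.mp (by simpa using hpw :
      (hkey x :: xs.map hkey).Pairwise (· ≤ ·))
    have hge : ∀ y ∈ xs, hkey x ≤ hkey y := fun y hy =>
      hc.1 (hkey y) (List.mem_map_of_mem hy)
    have hgt := keys_dropWhile_gt xs (hkey x) hc.2 hge
    have hsplit := List.takeWhile_append_dropWhile (p := fun y => hkey y == hkey x) (l := xs)
    have hsub : ((xs.dropWhile (fun y => hkey y == hkey x)).map hkey).Sublist (xs.map hkey) :=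
      (xs.dropWhile_sublist _).map hkey
    rw [grp, dk, List.map_cons]
    congr 1
    · -- head bucket: filter (== hkey x) keeps x and exactly the leading run
      have htake : (xs.takeWhile (fun y => hkey y == hkey x)).filter
          (fun s => hkey s == hkey x) = xs.takeWhile (fun y => hkey y == hkey x) :=
        List.filter_eq_self.mpr (fun y hy => List.mem_takeWhile_imp (p := fun z => hkey z == hkey x) hy)
      have hdrop : (xs.dropWhile (fun y => hkey y == hkey x)).filter
          (fun s => hkey s == hkey x) = [] := by
        rw [List.filter_eq_nil_iff]
        intro y hy
        simpa using ne_of_gt (hgt y hy)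
      rw [List.filter_cons_of_pos (by simp), ← hsplit, List.filter_append, htake, hdrop]
      simp
    · -- remaining buckets: keys > hkey x see neither x nor the leading run
      rw [ih (hc.2.sublist hsub)]
      refine List.map_congr_left ?_
      intro k hk
      rcases List.mem_map.mp ((mem_dk _ k).mp hk) with ⟨y, hy, rfl⟩
      have hkgt : hkey x < hkey y := hgt y hy
      have hxne : (hkey x == hkey y) = false := by simpa using ne_of_lt hkgt
      have htake : (xs.takeWhile (fun z => hkey z == hkey x)).filter
          (fun s => hkey s == hkey y) = [] := by
        rw [List.filter_eq_nil_iff]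
        intro z hz
        have := List.mem_takeWhile_imp hz
        simp only [beq_iff_eq] at this
        simpa [this] using ne_of_lt hkgt
      rw [List.filter_cons_of_neg (by simpa using ne_of_lt hkgt), ← hsplit,
        List.filter_append, htake]
      simp

-- A's loop on a key-sorted tail produces the open run and then the remaining runs
lemma loop_eq (xs : List String) : ∀ (k : Char) (temp : List String),
    (∀ y ∈ xs, y ≠ "") → ((xs.map hkey).Pairwise (· ≤ ·)) → (∀ y ∈ xs, k ≤ hkey y) →
    sortAndDivideLoop xs (some k) temp []
      = (temp ++ xs.takeWhile (fun y => hkey y == k)) :: grp (xs.dropWhile (fun y => hkey y == k)) := by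
  induction xs with
  | nil => intro k temp _ _ _; simp [sortAndDivideLoop, grp]
  | cons x xs ih =>
    intro k temp hne hpw hge
    have hx : x ≠ "" := hne x (by simp)
    have hk : PySem.Str.pyGet? x 0 = some (hkey x) := pyGet?_zero_of_ne_empty x hx
    have hc := List.pairwise_cons.mp (by simpa using hpw :
      (hkey x :: xs.map hkey).Pairwise (· ≤ ·))
    have hhead : ∀ y ∈ xs, hkey x ≤ hkey y := fun y hy =>
      hc.1 (hkey y) (List.mem_map_of_mem hy)
    by_cases hcase : hkey x = k
    · have heq : (PySem.Str.pyGet? x 0 == some k) = true := by rw [hk, hcase]; simp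
      rw [List.takeWhile_cons_of_pos (by simp [hcase]),
        List.dropWhile_cons_of_pos (by simp [hcase])]
      simp only [sortAndDivideLoop, heq, if_pos]
      rw [ih k (temp ++ [x]) (fun y hy => hne y (by simp [hy])) hc.2
        (fun y hy => hge y (by simp [hy]))]
      simp
    · have hneq : (PySem.Str.pyGet? x 0 == some k) = false := by rw [hk]; simpa using hcase
      rw [List.takeWhile_cons_of_neg (by simp [hcase]),
        List.dropWhile_cons_of_neg (by simp [hcase])]
      simp only [sortAndDivideLoop, hneq]
      rw [if_neg (by simp), hk,
        loop_acc xs (some (hkey x)) [x] ([] ++ [temp.map (fun i => i)]),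
        ih (hkey x) [x] (fun y hy => hne y (by simp [hy])) hc.2 hhead]
      rw [grp]
      simp

-- ===== VERDICT (by name: the statement is the Claim_ definition above) =====
theorem sort_and_divide_spec : Claim_equal_sort_and_divide := by
  intro list _ hpre
  rcases hpre with ⟨hnil, hne⟩
  unfold Spec_sort_and_divide
  have hmapid : list.map (fun i => i) = list := List.map_id' list
  -- the sorted list and its key order
  have hperm : (PySem.List.sorted list (fun s => s) false).Perm list :=
    PySem.List.sorted_perm list (fun s => s) false
  have hsne : ∀ s ∈ PySem.List.sorted list (fun s => s) false, s ≠ "" := fun s hs =>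
    hne s (hperm.mem_iff.mp hs)
  have hsorted : (PySem.List.sorted list (fun s => s) false).Pairwise (· ≤ ·) := by
    simpa using PySem.List.sorted_pairwise list (fun s => s)
  have hkeys : ((PySem.List.sorted list (fun s => s) false).map hkey).Pairwise (· ≤ ·) := by
    rw [List.pairwise_map]
    exact hsorted.imp_of_mem (fun {a b} ha hb hab => hkey_mono a b (hsne a ha) hab)
  -- A's value is grp of the sorted list
  have hA : sort_and_divide list = grp (PySem.List.sorted list (fun s => s) false) := by
    simp only [sort_and_divide, hmapid]
    cases hx : PySem.List.sorted list (fun s => s) false with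
    | nil => exact absurd ((PySem.List.sorted_eq_nil_iff _ _ _).mp hx) hnil
    | cons t0 rest =>
      rw [hx] at hsne hkeys
      have hc := List.pairwise_cons.mp (by simpa using hkeys :
        (hkey t0 :: rest.map hkey).Pairwise (· ≤ ·))
      show sortAndDivideLoop rest (PySem.Str.pyGet? t0 0) [t0] [] = grp (t0 :: rest)
      rw [pyGet?_zero_of_ne_empty t0 (hsne t0 (by simp)),
        loop_eq rest (hkey t0) [t0] (fun y hy => hsne y (by simp [hy])) hc.2
          (fun y hy => hc.1 (hkey y) (List.mem_map_of_mem hy)), grp]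
      simp
  -- B's key list is dk of the sorted list
  have hfm : list.filterMap (fun item => PySem.Str.pyGet? item 0) = list.map hkey := by
    rw [List.filterMap_congr (g := fun item => some (hkey item))
      (fun x hx => pyGet?_zero_of_ne_empty x (hne x hx))]
    exact congrFun (List.filterMap_eq_map (f := hkey)) list
  have hkeyset : PySem.List.sorted
      (PySem.Set.ofList (list.filterMap (fun item => PySem.Str.pyGet? item 0)))
      (fun c => c) false = dk (PySem.List.sorted list (fun s => s) false) := by
    apply PySem.List.sorted_eq_of_perm_of_pairwise_lt
    · -- same distinct keys, as a permutation
      apply (List.perm_ext_iff_of_nodup (dk_pairwise _ hkeys).nodup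
        (by rw [hfm]; exact PySem.Set.nodup_ofList _)).mpr
      intro c
      rw [mem_dk, hfm, PySem.Set.mem_ofList]
      constructor
      · intro hc
        rcases List.mem_map.mp hc with ⟨y, hy, rfl⟩
        exact List.mem_map_of_mem (hperm.mem_iff.mp hy)
      · intro hc
        rcases List.mem_map.mp hc with ⟨y, hy, rfl⟩
        exact List.mem_map_of_mem (hperm.mem_iff.mpr hy)
    · exact dk_pairwise _ hkeys
  -- each of B's buckets is the corresponding filter of the sorted list
  have hbucket : ∀ k : Char,
      PySem.List.sorted (list.filter (fun item => PySem.Str.pyGet? item 0 == some k))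
        (fun s => s) false
      = (PySem.List.sorted list (fun s => s) false).filter (fun s => hkey s == k) := by
    intro k
    have hfc : list.filter (fun item => PySem.Str.pyGet? item 0 == some k)
        = list.filter (fun s => hkey s == k) :=
      List.filter_congr (fun x hx => by rw [pyGet?_zero_of_ne_empty x (hne x hx)]; simp)
    rw [hfc]
    exact PySem.List.sorted_id_eq_of_perm_of_pairwise _ _ (hperm.filter _)
      (hsorted.sublist List.filter_sublist)
  have hB : sort_and_divide_alt list
      = grp (PySem.List.sorted list (fun s => s) false) := by
    simp only [sort_and_divide_alt, hkeyset]
    rw [List.map_congr_left (fun k _ => hbucket k)]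
    exact (grp_eq_map _ hkeys).symm
  rw [hA, hB]
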